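-- pv_equiv track=rewrite | github.com/druceinfoblox/mosaic | backend/app/services/recommender.py | _infer_ports_from_fqdn
-- ===== SOURCE A (Python) =====
-- def _infer_ports_from_fqdn(fqdn: str) -> list[int]:
--     fqdn_lower = fqdn.lower()
--     if any(x in fqdn_lower for x in ("smtp", "mail", "_25")):
--         return [25, 587, 465]
--     if any(x in fqdn_lower for x in ("ldap", "_389")):
--         return [389, 636]
--     if any(x in fqdn_lower for x in ("_443", "https", "web", "www")):
--         return [443]
--     if any(x in fqdn_lower for x in ("_80", "http")):
--         return [80]
--     if "rdp" in fqdn_lower or "_3389" in fqdn_lower: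
--         return [3389]
--     if "ssh" in fqdn_lower or "_22" in fqdn_lower:
--         return [22]
--     if "sql" in fqdn_lower or "db" in fqdn_lower or "postgres" in fqdn_lower:
--         return [5432, 1433, 3306]
--     return []
-- ===== SOURCE B (Python) =====
-- # Different algorithm: instead of a chain of substring-membership tests, scan the
-- # lowered string once position by position, checking which keywords start at each
-- # position, and keep the lowest-priority rule index seen; return its ports at the end.
-- _KEYWORDS = {
--     "smtp": 0, "mail": 0, "_25": 0,
--     "ldap": 1, "_389": 1,
--     "_443": 2, "https": 2, "web": 2, "www": 2,
--     "_80": 3, "http": 3,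
--     "rdp": 4, "_3389": 4,
--     "ssh": 5, "_22": 5,
--     "sql": 6, "db": 6, "postgres": 6,
-- }
-- _PORTS = [[25, 587, 465], [389, 636], [443], [80], [3389], [22], [5432, 1433, 3306]]
--
-- def _infer_ports_from_fqdn(fqdn: str) -> list[int]:
--     s = fqdn.lower()
--     best = None
--     for i in range(len(s)):
--         for kw, rule in _KEYWORDS.items():
--             if (best is None or rule < best) and s.startswith(kw, i):
--                 best = rule
--     return _PORTS[best] if best is not None else []
-- ===== Notes on version B (the rewrite author's own statement) =====
-- stated objective: alternative
-- what changed: Replaces the chain of whole-string substring-membership tests with a hand-rolled single left-to-right scan of the lowered string: at each position it checks, against one keyword-to-rule-priority map, which keywords start there and keeps the minimum rule priority seen, returning that rule's ports at the end; this trades A's fast built-in substring search for an explicit scan.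
import Mathlib
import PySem

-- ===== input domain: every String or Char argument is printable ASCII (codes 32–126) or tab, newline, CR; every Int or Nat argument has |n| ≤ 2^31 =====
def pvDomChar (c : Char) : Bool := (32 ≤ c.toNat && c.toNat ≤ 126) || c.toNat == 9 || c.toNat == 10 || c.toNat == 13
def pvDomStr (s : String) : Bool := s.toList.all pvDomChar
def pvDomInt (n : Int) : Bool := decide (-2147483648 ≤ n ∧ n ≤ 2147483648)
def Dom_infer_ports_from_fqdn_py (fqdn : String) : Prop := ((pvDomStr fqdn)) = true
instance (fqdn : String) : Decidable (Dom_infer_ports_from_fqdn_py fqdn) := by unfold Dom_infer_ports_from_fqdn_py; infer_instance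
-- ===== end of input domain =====

-- B replaces A's chain of substring-membership tests by a single position-by-position
-- scan of the lowered string that keeps the minimum-priority matching rule (alternative).

-- ===== PORT A =====
def infer_ports_from_fqdn_py (fqdn : String) : List Int :=
  let fqdn_lower := PySem.Str.lower fqdn
  if (["smtp", "mail", "_25"].any (fun x => PySem.Str.isIn x fqdn_lower)) then [25, 587, 465]
  else if (["ldap", "_389"].any (fun x => PySem.Str.isIn x fqdn_lower)) then [389, 636]
  else if (["_443", "https", "web", "www"].any (fun x => PySem.Str.isIn x fqdn_lower)) then [443]
  else if (["_80", "http"].any (fun x => PySem.Str.isIn x fqdn_lower)) then [80]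
  else if PySem.Str.isIn "rdp" fqdn_lower || PySem.Str.isIn "_3389" fqdn_lower then [3389]
  else if PySem.Str.isIn "ssh" fqdn_lower || PySem.Str.isIn "_22" fqdn_lower then [22]
  else if PySem.Str.isIn "sql" fqdn_lower || PySem.Str.isIn "db" fqdn_lower || PySem.Str.isIn "postgres" fqdn_lower then [5432, 1433, 3306]
  else []

-- ===== PORT B =====
-- the _KEYWORDS dict of Source B (keyword -> rule priority), in insertion order
def pvKeywords : List (List Char × Nat) :=
  [ ("smtp".toList, 0), ("mail".toList, 0), ("_25".toList, 0)
  , ("ldap".toList, 1), ("_389".toList, 1)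
  , ("_443".toList, 2), ("https".toList, 2), ("web".toList, 2), ("www".toList, 2)
  , ("_80".toList, 3), ("http".toList, 3)
  , ("rdp".toList, 4), ("_3389".toList, 4)
  , ("ssh".toList, 5), ("_22".toList, 5)
  , ("sql".toList, 6), ("db".toList, 6), ("postgres".toList, 6) ]

-- the _PORTS table of Source B
def pvPorts : List (List Int) :=
  [[25, 587, 465], [389, 636], [443], [80], [3389], [22], [5432, 1433, 3306]]

-- inner loop over the keyword map at one position i (s.startswith(kw, i) = isPrefixOf on s.drop i)
def pvBestStep (s : List Char) (best : Option Nat) (i : Nat) : Option Nat :=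
  pvKeywords.foldl (fun b kr =>
    if (match b with | none => true | some v => decide (kr.2 < v)) && kr.1.isPrefixOf (s.drop i)
    then some kr.2 else b) best

def infer_ports_from_fqdn_py_alt (fqdn : String) : List Int :=
  let s := (PySem.Str.lower fqdn).toList
  let best := (List.range s.length).foldl (pvBestStep s) none
  match best with
  | some r => pvPorts.getD r []
  | none => []

-- ===== PRECONDITION & SPEC =====
def Spec_infer_ports_from_fqdn_py (fqdn : String) (out : List Int) : Prop := out = infer_ports_from_fqdn_py_alt fqdn
instance (fqdn : String) (out : List Int) : Decidable (Spec_infer_ports_from_fqdn_py fqdn out) := by unfold Spec_infer_ports_from_fqdn_py; infer_instance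

-- ===== CLAIM (what is proved, stated in full; the proofs are below) =====
def Claim_equal_infer_ports_from_fqdn_py : Prop := ∀ (fqdn : String), Dom_infer_ports_from_fqdn_py fqdn → Spec_infer_ports_from_fqdn_py fqdn (infer_ports_from_fqdn_py fqdn)

-- ===== LEMMAS AND PROOFS =====

-- option-min: the value pvBestStep's update maintains
def pvOmin : Option Nat → Option Nat → Option Nat
  | none, b => b
  | some v, none => some v
  | some v, some w => some (min v w)

-- the contribution of one (position, keyword-rule) candidate
def pvG (s : List Char) (x : Nat × (List Char × Nat)) : Option Nat :=
  if x.2.1.isPrefixOf (s.drop x.1) then some x.2.2 else none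

-- all candidates, position-major, as Source B's nested loops enumerate them
def pvCands (s : List Char) : List (Nat × (List Char × Nat)) :=
  (List.range s.length).flatMap (fun i => pvKeywords.map (fun kr => (i, kr)))

-- omin-fold over a candidate list
def pvF (s : List Char) (L : List (Nat × (List Char × Nat))) (b : Option Nat) : Option Nat :=
  L.foldl (fun b x => pvOmin b (pvG s x)) b

-- "rule k has a matching keyword in s"
def pvMB (s : List Char) (k : Nat) : Bool :=
  pvKeywords.any (fun kr => kr.2 == k && PySem.Chars.isIn kr.1 s)

lemma pvOmin_none_right (b : Option Nat) : pvOmin b none = b := by cases b <;> rfl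

lemma pvStep_eq (s : List Char) (i : Nat) (b : Option Nat) (kr : List Char × Nat) :
    (if (match b with | none => true | some v => decide (kr.2 < v)) && kr.1.isPrefixOf (s.drop i)
     then some kr.2 else b) = pvOmin b (pvG s (i, kr)) := by
  cases b with
  | none => by_cases hp : kr.1.isPrefixOf (s.drop i) <;> simp [pvG, pvOmin, hp]
  | some v =>
    by_cases hp : kr.1.isPrefixOf (s.drop i)
    · by_cases hlt : kr.2 < v <;> simp [pvG, pvOmin, hp, hlt] <;> omega
    · simp [pvG, pvOmin, hp]

lemma pvBestStep_eq (s : List Char) (b : Option Nat) (i : Nat) :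
    pvBestStep s b i = pvF s (pvKeywords.map (fun kr => (i, kr))) b := by
  unfold pvBestStep pvF
  rw [List.foldl_map]
  have h : (fun (b : Option Nat) (kr : List Char × Nat) =>
      if (match b with | none => true | some v => decide (kr.2 < v)) && kr.1.isPrefixOf (s.drop i)
      then some kr.2 else b) = fun b kr => pvOmin b (pvG s (i, kr)) := by
    funext b kr; exact pvStep_eq s i b kr
  rw [h]

lemma pvF_append (s : List Char) (L1 L2 : List (Nat × (List Char × Nat))) (b : Option Nat) :
    pvF s (L1 ++ L2) b = pvF s L2 (pvF s L1 b) := by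
  unfold pvF; exact List.foldl_append

lemma pvFold_flat (s : List Char) :
    ∀ (l : List Nat) (b : Option Nat),
      l.foldl (pvBestStep s) b = pvF s (l.flatMap (fun i => pvKeywords.map (fun kr => (i, kr)))) b := by
  intro l
  induction l with
  | nil => intro b; rfl
  | cons i l ih =>
    intro b
    simp only [List.foldl_cons, List.flatMap_cons, pvBestStep_eq, pvF_append, ih]

lemma pvBest_eq (s : List Char) :
    (List.range s.length).foldl (pvBestStep s) none = pvF s (pvCands s) none := by
  unfold pvCands
  exact pvFold_flat s (List.range s.length) none

lemma pvF_all_none (s : List Char) (L : List (Nat × (List Char × Nat)))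
    (h : ∀ x ∈ L, pvG s x = none) : ∀ b, pvF s L b = b := by
  induction L with
  | nil => intro b; rfl
  | cons x L ih =>
    intro b
    have hx : pvG s x = none := h x (by simp)
    simp only [pvF, List.foldl_cons] at *
    rw [hx, pvOmin_none_right]
    exact ih (fun y hy => h y (by simp [hy])) b

lemma pvF_mem (s : List Char) (L : List (Nat × (List Char × Nat))) :
    ∀ b r, pvF s L b = some r → b = some r ∨ ∃ x ∈ L, pvG s x = some r := by
  induction L with
  | nil => intro b r h; exact Or.inl h
  | cons x L ih =>
    intro b r h
    simp only [pvF, List.foldl_cons] at h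
    rcases ih (pvOmin b (pvG s x)) r h with h' | ⟨y, hy, hgy⟩
    · cases hb : b with
      | none =>
        rw [hb] at h'
        cases hg : pvG s x with
        | none => rw [hg] at h'; exact absurd h' (by simp [pvOmin])
        | some w =>
          rw [hg] at h'
          have h'' : some w = some r := h'
          exact Or.inr ⟨x, by simp, hg.trans h''⟩
      | some v =>
        rw [hb] at h'
        cases hg : pvG s x with
        | none =>
          rw [hg, pvOmin_none_right] at h'
          exact Or.inl h' 
        | some w =>
          rw [hg] at h'
          have h'' : min v w = r := Option.some.inj h'
          rcases Nat.le_total v w with hle | hle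
          · refine Or.inl ?_; congr 1; omega
          · refine Or.inr ⟨x, by simp, ?_⟩; rw [hg]; congr 1; omega
    · exact Or.inr ⟨y, by simp [hy], hgy⟩

lemma pvF_some (s : List Char) (L : List (Nat × (List Char × Nat))) :
    ∀ w, ∃ r, pvF s L (some w) = some r ∧ r ≤ w := by
  induction L with
  | nil => intro w; exact ⟨w, rfl, le_refl w⟩
  | cons x L ih =>
    intro w
    simp only [pvF, List.foldl_cons]
    cases hg : pvG s x with
    | none =>
      rw [show pvOmin (some w) none = some w from rfl]
      exact ih w
    | some v =>
      rw [show pvOmin (some w) (some v) = some (min w v) from rfl]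
      obtain ⟨r, hr, hle⟩ := ih (min w v)
      exact ⟨r, hr, le_trans hle (Nat.min_le_left w v)⟩

lemma pvF_le (s : List Char) (L : List (Nat × (List Char × Nat))) :
    ∀ x ∈ L, ∀ v, pvG s x = some v → ∀ b, ∃ r, pvF s L b = some r ∧ r ≤ v := by
  induction L with
  | nil => intro x hx; simp at hx
  | cons y L ih =>
    intro x hx v hv b
    rcases List.mem_cons.mp hx with rfl | hx'
    · simp only [pvF, List.foldl_cons, hv]
      cases b with
      | none =>
        rw [show pvOmin none (some v) = some v from rfl]
        exact pvF_some s L v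
      | some w =>
        rw [show pvOmin (some w) (some v) = some (min w v) from rfl]
        obtain ⟨r, hr, hle⟩ := pvF_some s L (min w v)
        exact ⟨r, hr, le_trans hle (Nat.min_le_right w v)⟩
    · simp only [pvF, List.foldl_cons]
      exact ih x hx' v hv (pvOmin b (pvG s y))

lemma pvKeywords_ne_nil : ∀ kr ∈ pvKeywords, kr.1 ≠ [] := by decide

lemma pvG_some_mb (s : List Char) (x : Nat × (List Char × Nat)) (r : Nat)
    (hx : x ∈ pvCands s) (h : pvG s x = some r) : pvMB s r = true := by
  unfold pvG at h
  split at h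
  · rename_i hp
    obtain ⟨hkr, rfl⟩ : x.2 ∈ pvKeywords ∧ x.2.2 = r := by
      constructor
      · unfold pvCands at hx
        simp only [List.mem_flatMap, List.mem_map, List.mem_range] at hx
        obtain ⟨i, _, kr, hkr, hx'⟩ := hx
        rw [← hx']; exact hkr
      · exact (Option.some.injEq _ _).mp h
    unfold pvMB
    rw [List.any_eq_true]
    refine ⟨x.2, hkr, ?_⟩
    have hin : PySem.Chars.isIn x.2.1 s = true :=
      (PySem.Chars.exists_prefix_drop_iff_isIn _ _).mp ⟨x.1, List.isPrefixOf_iff_prefix.mp hp⟩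
    simp [hin]
  · exact absurd h (by simp)

lemma pvMB_cand (s : List Char) (k : Nat) (h : pvMB s k = true) :
    ∃ x ∈ pvCands s, pvG s x = some k := by
  unfold pvMB at h
  rw [List.any_eq_true] at h
  obtain ⟨kr, hkr, hh⟩ := h
  rw [Bool.and_eq_true, beq_iff_eq] at hh
  obtain ⟨hk, hin⟩ := hh
  obtain ⟨j, hj⟩ := (PySem.Chars.exists_prefix_drop_iff_isIn _ _).mpr hin
  have hjlt : j < s.length := by
    by_contra hge
    have : s.drop j = [] := List.drop_eq_nil_of_le (by omega)
    rw [this] at hj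
    exact pvKeywords_ne_nil kr hkr (List.prefix_nil.mp hj)
  refine ⟨(j, kr), ?_, ?_⟩
  · unfold pvCands
    simp only [List.mem_flatMap, List.mem_map, List.mem_range]
    exact ⟨j, hjlt, kr, hkr, rfl⟩
  · unfold pvG
    simp [List.isPrefixOf_iff_prefix.mpr hj, hk]

lemma pvBest_some (s : List Char) (k : Nat) (hk : pvMB s k = true)
    (hlt : ∀ j, j < k → pvMB s j = false) :
    pvF s (pvCands s) none = some k := by
  obtain ⟨x, hx, hg⟩ := pvMB_cand s k hk
  obtain ⟨r, hr, hle⟩ := pvF_le s (pvCands s) x hx k hg none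
  rcases pvF_mem s (pvCands s) none r hr with h' | ⟨y, hy, hgy⟩
  · exact absurd h' (by simp)
  · have hmb := pvG_some_mb s y r hy hgy
    have : ¬ r < k := fun hrk => by rw [hlt r hrk] at hmb; exact absurd hmb (by simp)
    rw [hr]; congr 1; omega

lemma pvBest_none (s : List Char) (h : ∀ k, pvMB s k = false) :
    pvF s (pvCands s) none = none := by
  apply pvF_all_none
  intro x hx
  cases hg : pvG s x with
  | none => rfl
  | some r =>
    have := pvG_some_mb s x r hx hg
    rw [h r] at this
    exact absurd this (by simp)

-- B computed as the first-matching-rule chain over the pvMB booleans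
lemma pvChain_core (s : List Char) :
    (match (List.range s.length).foldl (pvBestStep s) none with
     | some r => pvPorts.getD r []
     | none => []) =
      (if pvMB s 0 then [25, 587, 465]
       else if pvMB s 1 then [389, 636]
       else if pvMB s 2 then [443]
       else if pvMB s 3 then [80]
       else if pvMB s 4 then [3389]
       else if pvMB s 5 then [22]
       else if pvMB s 6 then [5432, 1433, 3306]
       else []) := by
  rw [pvBest_eq]
  have hmb7 : ∀ r, pvMB s r = true → r ≤ 6 := by
    intro r h
    unfold pvMB at h
    rw [List.any_eq_true] at h
    obtain ⟨kr, hkr, hh⟩ := h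
    rw [Bool.and_eq_true, beq_iff_eq] at hh
    have : kr.2 ≤ 6 := by fin_cases hkr <;> simp
    omega
  by_cases h0 : pvMB s 0 = true
  · rw [pvBest_some s 0 h0 (by intro j hj; exact absurd hj (by omega))]; simp [h0, pvPorts]
  · rw [Bool.not_eq_true] at h0
    by_cases h1 : pvMB s 1 = true
    · rw [pvBest_some s 1 h1 (by intro j hj; interval_cases j; exact h0)]
      simp [h0, h1, pvPorts]
    · rw [Bool.not_eq_true] at h1
      by_cases h2 : pvMB s 2 = true
      · rw [pvBest_some s 2 h2 (by intro j hj; interval_cases j <;> assumption)]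
        simp [h0, h1, h2, pvPorts]
      · rw [Bool.not_eq_true] at h2
        by_cases h3 : pvMB s 3 = true
        · rw [pvBest_some s 3 h3 (by intro j hj; interval_cases j <;> assumption)]
          simp [h0, h1, h2, h3, pvPorts]
        · rw [Bool.not_eq_true] at h3
          by_cases h4 : pvMB s 4 = true
          · rw [pvBest_some s 4 h4 (by intro j hj; interval_cases j <;> assumption)]
            simp [h0, h1, h2, h3, h4, pvPorts]
          · rw [Bool.not_eq_true] at h4
            by_cases h5 : pvMB s 5 = true
            · rw [pvBest_some s 5 h5 (by intro j hj; interval_cases j <;> assumption)]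
              simp [h0, h1, h2, h3, h4, h5, pvPorts]
            · rw [Bool.not_eq_true] at h5
              by_cases h6 : pvMB s 6 = true
              · rw [pvBest_some s 6 h6 (by intro j hj; interval_cases j <;> assumption)]
                simp [h0, h1, h2, h3, h4, h5, h6, pvPorts]
              · rw [Bool.not_eq_true] at h6
                rw [pvBest_none s (by
                  intro k
                  by_cases hk : k ≤ 6
                  · interval_cases k <;> assumption
                  · cases hmb : pvMB s k
                    · rfl
                    · exact absurd (hmb7 k hmb) hk)]
                simp [h0, h1, h2, h3, h4, h5, h6]

lemma pvAlt_chain (fqdn : String) :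
    infer_ports_from_fqdn_py_alt fqdn =
      (if pvMB (PySem.Str.lower fqdn).toList 0 then [25, 587, 465]
       else if pvMB (PySem.Str.lower fqdn).toList 1 then [389, 636]
       else if pvMB (PySem.Str.lower fqdn).toList 2 then [443]
       else if pvMB (PySem.Str.lower fqdn).toList 3 then [80]
       else if pvMB (PySem.Str.lower fqdn).toList 4 then [3389]
       else if pvMB (PySem.Str.lower fqdn).toList 5 then [22]
       else if pvMB (PySem.Str.lower fqdn).toList 6 then [5432, 1433, 3306]
       else []) := pvChain_core (PySem.Str.lower fqdn).toList

-- ===== VERDICT (by name: the statement is the Claim_ definition above) =====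
theorem infer_ports_from_fqdn_py_spec : Claim_equal_infer_ports_from_fqdn_py := by
  intro fqdn _
  unfold Spec_infer_ports_from_fqdn_py
  rw [pvAlt_chain]
  unfold infer_ports_from_fqdn_py
  simp only [pvMB, pvKeywords, List.any_cons, List.any_nil, Bool.or_false,
    PySem.Str.isIn_eq, Nat.reduceBEq, beq_self_eq_true, Bool.true_and, Bool.false_and,
    Bool.false_or, Bool.or_assoc]
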